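-- pv_equiv track=rewrite | github.com/banana-galaxy/challenges | challenge8(theater_escape)/check.py | whichExit
-- ===== SOURCE A (Python) =====
-- def whichExit(matrix):
--     left = 0
--     right = 0
--     side = -1
--     for row in matrix:
--         if 0 not in row:
--             continue
--         for i in row:
--             if i == 0:
--                 side = 1
--             elif i == 1:
--                 if side == -1:
--                     left += 1
--                 else:
--                     right += 1
--     return "left" if left<right else "right" if left>right else "same"
-- ===== SOURCE B (Python) =====
-- def whichExit(matrix):
--     flat = [x for row in matrix if 0 in row for x in row]
--     if not flat:
--         return "same"
--     idx = flat.index(0)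
--     left = flat[:idx].count(1)
--     right = flat[idx+1:].count(1)
--     return "left" if left < right else "right" if left > right else "same"
-- ===== Notes on version B (the rewrite author's own statement) =====
-- stated objective: alternative
-- what changed: Replaces A's stateful side-flag fold over the nested matrix by flattening the zero-containing rows into one stream and splitting it at its first zero, counting 1s on each side with list.count.
import Mathlib
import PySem

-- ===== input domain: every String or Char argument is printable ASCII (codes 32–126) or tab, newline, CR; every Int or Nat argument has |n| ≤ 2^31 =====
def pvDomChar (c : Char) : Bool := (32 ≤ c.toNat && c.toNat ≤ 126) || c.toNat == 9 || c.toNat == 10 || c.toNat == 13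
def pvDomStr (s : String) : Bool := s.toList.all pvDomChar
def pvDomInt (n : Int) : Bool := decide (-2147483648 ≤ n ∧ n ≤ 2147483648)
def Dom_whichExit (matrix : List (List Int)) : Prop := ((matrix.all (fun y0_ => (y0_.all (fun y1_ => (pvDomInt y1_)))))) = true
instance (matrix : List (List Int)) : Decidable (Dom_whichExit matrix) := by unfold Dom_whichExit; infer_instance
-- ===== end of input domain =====

-- B flattens the zero-containing rows into one stream and splits it at its first zero,
-- counting 1s on each side, instead of A's stateful side-flag fold (objective: alternative).


-- ===== PORT A =====
-- state = (left, right, side), exactly A's three variables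
def whichExitStep (s : Int × Int × Int) (i : Int) : Int × Int × Int :=
  if i = 0 then (s.1, s.2.1, 1)
  else if i = 1 then
    (if s.2.2 = -1 then (s.1 + 1, s.2.1, s.2.2) else (s.1, s.2.1 + 1, s.2.2))
  else s

def whichExit (matrix : List (List Int)) : String :=
  let st := matrix.foldl
    (fun s row => if (0 : Int) ∈ row then row.foldl whichExitStep s else s)
    (0, 0, -1)
  if st.1 < st.2.1 then "left" else if st.1 > st.2.1 then "right" else "same"

-- ===== PORT B =====
def whichExit_alt (matrix : List (List Int)) : String :=
  let flat := (matrix.filter (fun row => decide ((0 : Int) ∈ row))).flatMap id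
  if flat = [] then "same"
  else
    match PySem.List.index? flat 0 with
    | none => "same"  -- unreachable: flat ≠ [] forces 0 ∈ flat (flat.index(0) cannot raise)
    | some idx =>
      let left := PySem.List.count (PySem.List.slice flat none (some (idx : Int))) 1
      let right := PySem.List.count (PySem.List.slice flat (some ((idx : Int) + 1)) none) 1
      if left < right then "left" else if left > right then "right" else "same"

-- ===== PRECONDITION & SPEC =====
def Spec_whichExit (matrix : List (List Int)) (out : String) : Prop := out = whichExit_alt matrix
instance (matrix : List (List Int)) (out : String) : Decidable (Spec_whichExit matrix out) := by unfold Spec_whichExit; infer_instance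

-- ===== CLAIM (what is proved, stated in full; the proofs are below) =====
def Claim_equal_whichExit : Prop := ∀ (matrix : List (List Int)), Dom_whichExit matrix → Spec_whichExit matrix (whichExit matrix)

-- ===== LEMMAS AND PROOFS =====

-- A's row-guarded double fold is the single fold over the flattened filtered rows
theorem foldl_guard_eq_flat (matrix : List (List Int)) (s : Int × Int × Int) :
    matrix.foldl (fun s row => if (0 : Int) ∈ row then row.foldl whichExitStep s else s) s
      = ((matrix.filter (fun row => decide ((0 : Int) ∈ row))).flatMap id).foldl whichExitStep s := by
  induction matrix generalizing s with
  | nil => rfl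
  | cons row rest ih =>
    by_cases h : (0 : Int) ∈ row <;>
      simp [h, List.foldl_append, ih]

-- once side = 1, every later 1 counts to the right
theorem foldl_side_one (xs : List Int) (l r : Int) :
    xs.foldl whichExitStep (l, r, 1) = (l, r + (xs.count 1 : Int), 1) := by
  induction xs generalizing r with
  | nil => simp
  | cons x xs ih =>
    by_cases h0 : x = 0
    · subst h0; simp [whichExitStep, ih]
    · by_cases h1 : x = 1
      · subst h1; simp [whichExitStep, ih]; ring
      · simp [whichExitStep, h0, h1, ih]

-- the characterisation of A's fold started with side = -1
theorem foldl_side_neg (xs : List Int) (l r : Int) :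
    xs.foldl whichExitStep (l, r, -1)
      = match List.idxOf? 0 xs with
        | none => (l + (xs.count 1 : Int), r, -1)
        | some k => (l + ((xs.take k).count 1 : Int), r + ((xs.drop (k + 1)).count 1 : Int), 1) := by
  induction xs generalizing l r with
  | nil => simp
  | cons x xs ih =>
    by_cases h0 : x = 0
    · subst h0
      simp [whichExitStep, List.idxOf?_cons, foldl_side_one]
    · by_cases h1 : x = 1
      · subst h1
        have : List.idxOf? (0 : Int) (1 :: xs) = (List.idxOf? 0 xs).map (· + 1) := by
          simp [List.idxOf?_cons]
        rw [List.foldl_cons, this]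
        simp only [whichExitStep]; norm_num
        rw [ih]
        cases hk : List.idxOf? (0 : Int) xs with
        | none => simp; ring
        | some k => simp [List.take_succ_cons]; ring
      · have : List.idxOf? (0 : Int) (x :: xs) = (List.idxOf? 0 xs).map (· + 1) := by
          simp [List.idxOf?_cons, h0]
        rw [List.foldl_cons, this]
        simp only [whichExitStep, if_neg h0, if_neg h1]
        rw [ih]
        cases hk : List.idxOf? (0 : Int) xs with
        | none => simp [h1]
        | some k => simp [List.take_succ_cons, h1]

-- the flattened filtered stream contains 0 unless it is empty
theorem zero_mem_flat (matrix : List (List Int))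
    (h : (matrix.filter (fun row => decide ((0 : Int) ∈ row))).flatMap id ≠ []) :
    (0 : Int) ∈ (matrix.filter (fun row => decide ((0 : Int) ∈ row))).flatMap id := by
  rcases List.exists_mem_of_ne_nil _ h with ⟨a, ha⟩
  rcases List.mem_flatMap.1 ha with ⟨row, hrow, _⟩
  exact List.mem_flatMap.2 ⟨row, hrow, by simpa using (List.mem_filter.1 hrow).2⟩

-- ===== VERDICT (by name: the statement is the Claim_ definition above) =====
theorem whichExit_spec : Claim_equal_whichExit := by
  intro matrix _
  unfold Spec_whichExit whichExit whichExit_alt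
  rw [foldl_guard_eq_flat]
  set flat := (matrix.filter (fun row => decide ((0 : Int) ∈ row))).flatMap id with hflat
  rw [foldl_side_neg]
  by_cases hnil : flat = []
  · simp [hnil]
  · have hmem : (0 : Int) ∈ flat := zero_mem_flat matrix (hflat ▸ hnil)
    obtain ⟨k, hk⟩ := Option.isSome_iff_exists.1 (List.isSome_idxOf?.2 hmem)
    have hidx : PySem.List.index? flat 0 = some k := by
      simpa [PySem.List.index?_eq_idxOf?] using hk
    rw [if_neg hnil, hk, hidx]
    have hcast : ((k : Int) + 1) = ((k + 1 : Nat) : Int) := by push_cast; ring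
    simp only [hcast, PySem.List.slice_to_natCast, PySem.List.slice_from_natCast,
      PySem.List.count_eq]
    split_ifs <;> simp_all <;> omega
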